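-- pv_equiv track=rewrite | github.com/jorgefpont/csf003c | test_file.py | doubleDigits3
-- ===== SOURCE A (Python) =====
-- def doubleDigits3(num):
--    if num == 0:
--       return 1
--    elif num < 0:
--       return - doubleDigits3(-num)
--    else:
--       digit = num % 10
--       rest = num // 10
--       return digit + 10 * digit + 100 * doubleDigits3(rest)
-- ===== SOURCE B (Python) =====
-- def doubleDigits3(num):
--     neg = num < 0
--     n = -num if neg else num
--     acc = 0
--     power = 1
--     while n > 0:
--         acc += 11 * (n % 10) * power
--         power *= 100
--         n //= 10
--     res = acc + power
--     return -res if neg else res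
-- ===== Notes on version B (the rewrite author's own statement) =====
-- stated objective: alternative
-- what changed: Replaces the sign-then-digit recursion with a single iterative while-loop that peels digits off with divmod, accumulating each doubled digit at its place value, and adds the final power for the leading-1 base case.
import Mathlib
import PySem

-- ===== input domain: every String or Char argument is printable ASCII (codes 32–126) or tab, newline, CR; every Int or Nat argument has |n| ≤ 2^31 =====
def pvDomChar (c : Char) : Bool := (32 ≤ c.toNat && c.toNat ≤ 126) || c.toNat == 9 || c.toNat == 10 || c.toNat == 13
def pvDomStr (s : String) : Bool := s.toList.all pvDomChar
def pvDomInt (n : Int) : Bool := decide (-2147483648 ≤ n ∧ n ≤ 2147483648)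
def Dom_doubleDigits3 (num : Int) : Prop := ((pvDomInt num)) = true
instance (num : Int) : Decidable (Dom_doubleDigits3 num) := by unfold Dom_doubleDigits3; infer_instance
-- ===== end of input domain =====

-- B replaces the sign-then-digit recursion with one iterative digit-peeling loop over an accumulator (alternative decomposition, same cost).

-- termination helper cited by both ports
theorem pvFloordiv10_natAbs_lt (n : Int) (h : 0 < n) :
    (PySem.Int.floordiv n 10).natAbs < n.natAbs := by
  rw [PySem.Int.floordiv_eq_ediv_of_pos (by omega : (0:Int) < 10)]
  omega

-- ===== PORT A =====
def doubleDigits3 (num : Int) : Int :=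
  if num = 0 then 1
  else if num < 0 then - doubleDigits3 (-num)
  else
    let digit := PySem.Int.mod num 10
    let rest := PySem.Int.floordiv num 10
    digit + 10 * digit + 100 * doubleDigits3 rest
termination_by (num.natAbs, if num < 0 then 1 else 0)
decreasing_by
  · simp only [Int.natAbs_neg]
    rw [if_neg (by omega : ¬ -num < 0), if_pos (by assumption : num < 0)]
    exact Prod.Lex.right _ (by omega)
  · exact Prod.Lex.left _ _ (pvFloordiv10_natAbs_lt num (by omega))

-- ===== PORT B =====
-- the while-loop of Source B as a tail recursion over the same state (n, acc, power)
def ddLoop (n acc power : Int) : Int :=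
  if n > 0 then
    ddLoop (PySem.Int.floordiv n 10) (acc + 11 * (PySem.Int.mod n 10) * power) (power * 100)
  else acc + power
termination_by n.natAbs
decreasing_by exact pvFloordiv10_natAbs_lt n (by omega)

def doubleDigits3_alt (num : Int) : Int :=
  let neg := num < 0
  let n := if neg then -num else num
  let res := ddLoop n 0 1
  if neg then -res else res

-- ===== PRECONDITION & SPEC =====
def Spec_doubleDigits3 (num : Int) (out : Int) : Prop := out = doubleDigits3_alt num
instance (num : Int) (out : Int) : Decidable (Spec_doubleDigits3 num out) := by unfold Spec_doubleDigits3; infer_instance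

-- ===== CLAIM (what is proved, stated in full; the proofs are below) =====
def Claim_equal_doubleDigits3 : Prop := ∀ (num : Int), Dom_doubleDigits3 num → Spec_doubleDigits3 num (doubleDigits3 num)

-- ===== LEMMAS AND PROOFS =====

theorem ddLoop_eq (k : Nat) : ∀ (n : Int), n.natAbs = k → 0 ≤ n →
    ∀ acc power : Int, ddLoop n acc power = acc + power * doubleDigits3 n := by
  induction k using Nat.strong_induction_on with
  | _ k ih =>
    intro n hk hn acc power
    by_cases h : 0 < n
    · have h0 : ¬ n = 0 := by omega
      have h1 : ¬ n < 0 := by omega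
      have hrest : 0 ≤ PySem.Int.floordiv n 10 := by
        rw [PySem.Int.floordiv_eq_ediv_of_pos (by omega : (0:Int) < 10)]; omega
      rw [doubleDigits3, ddLoop]
      simp only [if_neg h0, if_neg h1, if_pos h]
      rw [ih _ (hk ▸ pvFloordiv10_natAbs_lt n h) _ rfl hrest]
      ring
    · have h0 : n = 0 := by omega
      subst h0
      rw [ddLoop, doubleDigits3]
      norm_num

-- ===== VERDICT (by name: the statement is the Claim_ definition above) =====
theorem doubleDigits3_spec : Claim_equal_doubleDigits3 := by
  intro num _
  unfold Spec_doubleDigits3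
  by_cases h : num < 0
  · have halt : doubleDigits3_alt num = -(ddLoop (-num) 0 1) := by
      simp [doubleDigits3_alt, h]
    rw [halt, ddLoop_eq (-num).natAbs (-num) rfl (by omega)]
    rw [doubleDigits3]
    rw [if_neg (by omega : ¬ num = 0), if_pos h]
    ring
  · have halt : doubleDigits3_alt num = ddLoop num 0 1 := by
      simp [doubleDigits3_alt, h]
    rw [halt, ddLoop_eq num.natAbs num rfl (by omega)]
    ring
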